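-- pv_equiv track=rewrite | github.com/alifyasa/cryptography-chat | cipher-server/utils/convert.py | string_to_byte_string
-- ===== SOURCE A (Python) =====
-- def string_to_byte_string(string):
--     ret = ""
--     for ch in string:
--         formatted_ch = format(ord(ch), '08b')
--         while len(formatted_ch) % 8 != 0:
--             formatted_ch = "0" + formatted_ch
--         ret += formatted_ch
--
--     return ret
-- ===== SOURCE B (Python) =====
-- def string_to_byte_string(string):
--     parts = []
--     for ch in string:
--         n = ord(ch)
--         length = max(1, (n.bit_length() + 7) // 8)
--         parts.append(''.join(format(byte, '08b') for byte in n.to_bytes(length, 'big')))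
--     return ''.join(parts)
-- ===== Notes on version B (the rewrite author's own statement) =====
-- stated objective: alternative
-- what changed: Replaces the while-loop that repeatedly prepends a zero character until the length is a multiple of 8 with a big-endian byte decomposition of the codepoint; each byte is formatted as exactly 8 bits, so no padding loop is needed.
import Mathlib
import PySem

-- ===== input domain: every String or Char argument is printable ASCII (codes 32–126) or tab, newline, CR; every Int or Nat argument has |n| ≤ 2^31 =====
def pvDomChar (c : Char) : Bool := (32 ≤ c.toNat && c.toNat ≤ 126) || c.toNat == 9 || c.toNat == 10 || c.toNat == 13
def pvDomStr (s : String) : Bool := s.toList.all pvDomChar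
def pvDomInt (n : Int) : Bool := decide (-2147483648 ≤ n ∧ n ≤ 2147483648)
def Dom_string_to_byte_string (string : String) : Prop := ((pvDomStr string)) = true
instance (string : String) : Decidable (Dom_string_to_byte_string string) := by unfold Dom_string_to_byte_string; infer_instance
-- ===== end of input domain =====

-- B replaces A's while-loop zero-padding with a big-endian byte decomposition of each codepoint (alternative decomposition, same cost).


-- ===== PORT A =====
-- binary digits of n (no leading zeros; "0" for 0), as Python's format(n, 'b');
-- fuel-structured so the kernel can evaluate it (fuel n+1 always suffices: each step halves n)
def pvBinCore (fuel n : Nat) : List Char :=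
  match fuel, n with
  | 0, _ => []
  | _, 0 => []
  | f+1, n => pvBinCore f (n / 2) ++ [if n % 2 = 1 then '1' else '0']

-- format(n, '08b'): binary, left-padded with '0' to width 8
def pvFormat08b (n : Nat) : List Char :=
  let s := if n = 0 then ['0'] else pvBinCore (n+1) n
  List.replicate (8 - s.length) '0' ++ s

-- A's while loop: prepend '0' until the length is a multiple of 8
-- (fuel 8 always suffices: each prepend adds 1 to the length, and length % 8 = 0 within 7 steps)
def pvPadLoop (fuel : Nat) (s : List Char) : List Char :=
  match fuel with
  | 0 => s
  | f+1 => if s.length % 8 ≠ 0 then pvPadLoop f ('0' :: s) else s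

def pvPadTo8 (s : List Char) : List Char := pvPadLoop 8 s

def string_to_byte_string (string : String) : String :=
  String.ofList (string.toList.foldl (fun ret ch => ret ++ pvPadTo8 (pvFormat08b ch.toNat)) [])

-- ===== PORT B =====
-- n.bit_length() (same fuel structure as pvBinCore)
def pvBitLenCore (fuel n : Nat) : Nat :=
  match fuel, n with
  | 0, _ => 0
  | _, 0 => 0
  | f+1, n => pvBitLenCore f (n / 2) + 1

def pvBitLength (n : Nat) : Nat := pvBitLenCore (n+1) n

-- n.to_bytes(len, 'big') as a list of byte values
def pvToBytesBE (n : Nat) : Nat → List Nat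
  | 0 => []
  | len+1 => pvToBytesBE (n / 256) len ++ [n % 256]

def string_to_byte_string_alt (string : String) : String :=
  String.ofList ((string.toList.map (fun ch =>
    let n := ch.toNat
    let length := max 1 ((pvBitLength n + 7) / 8)
    (pvToBytesBE n length).flatMap pvFormat08b)).flatten)

-- ===== PRECONDITION & SPEC =====
def Spec_string_to_byte_string (string : String) (out : String) : Prop := out = string_to_byte_string_alt string
instance (string : String) (out : String) : Decidable (Spec_string_to_byte_string string out) := by unfold Spec_string_to_byte_string; infer_instance

-- ===== CLAIM (what is proved, stated in full; the proofs are below) =====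
def Claim_equal_string_to_byte_string : Prop := ∀ (string : String), Dom_string_to_byte_string string → Spec_string_to_byte_string string (string_to_byte_string string)

-- ===== LEMMAS AND PROOFS =====
-- per-character agreement for every codepoint below 256 (Dom only needs ≤ 126)
set_option maxRecDepth 4096 in
theorem pv_perchar : ∀ n < 256,
    pvPadTo8 (pvFormat08b n) =
    (pvToBytesBE n (max 1 ((pvBitLength n + 7) / 8))).flatMap pvFormat08b := by
  decide

theorem pv_foldl_append {α β : Type} (f : α → List β) :
    ∀ (l : List α) (acc : List β),
      l.foldl (fun ret ch => ret ++ f ch) acc = acc ++ (l.map f).flatten := by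
  intro l
  induction l with
  | nil => simp
  | cons x xs ih => intro acc; simp [List.foldl, ih, List.append_assoc]

-- ===== VERDICT (by name: the statement is the Claim_ definition above) =====
theorem string_to_byte_string_spec : Claim_equal_string_to_byte_string := by
  intro s hdom
  unfold Spec_string_to_byte_string string_to_byte_string string_to_byte_string_alt
  rw [pv_foldl_append, List.nil_append]
  congr 1
  apply congrArg
  apply List.map_congr_left
  intro c hc
  have hch : pvDomChar c = true := by
    have := List.all_eq_true.mp hdom c hc
    exact this
  have hlt : c.toNat < 256 := by
    simp [pvDomChar, Bool.or_eq_true, Bool.and_eq_true, decide_eq_true_eq] at hch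
    omega
  exact pv_perchar c.toNat hlt
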